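-- pv_equiv track=rewrite | github.com/Lks7/ledgerflow-app | analytics/views.py | _adjacent_month
-- ===== SOURCE A (Python) =====
-- def _adjacent_month(month: str, delta: int) -> str:
--     """Return month string offset by `delta` months."""
--     try:
--         y, m = map(int, month.split("-"))
--         m += delta
--         while m > 12:
--             m -= 12
--             y += 1
--         while m < 1:
--             m += 12
--             y -= 1
--         return f"{y}-{str(m).zfill(2)}"
--     except Exception:
--         return month
-- ===== SOURCE B (Python) =====
-- def _adjacent_month(month: str, delta: int) -> str:
--     """Return month string offset by `delta` months."""
--     try:
--         y, m = map(int, month.split("-"))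
--         total = y * 12 + (m - 1) + delta
--         new_y, rem = divmod(total, 12)
--         return f"{new_y}-{str(rem + 1).zfill(2)}"
--     except Exception:
--         return month
-- ===== Notes on version B (the rewrite author's own statement) =====
-- stated objective: simpler
-- what changed: Replaces the two while-loop month normalizations with a single closed-form divmod on the linearized month index y*12+(m-1)+delta.
import Mathlib
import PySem

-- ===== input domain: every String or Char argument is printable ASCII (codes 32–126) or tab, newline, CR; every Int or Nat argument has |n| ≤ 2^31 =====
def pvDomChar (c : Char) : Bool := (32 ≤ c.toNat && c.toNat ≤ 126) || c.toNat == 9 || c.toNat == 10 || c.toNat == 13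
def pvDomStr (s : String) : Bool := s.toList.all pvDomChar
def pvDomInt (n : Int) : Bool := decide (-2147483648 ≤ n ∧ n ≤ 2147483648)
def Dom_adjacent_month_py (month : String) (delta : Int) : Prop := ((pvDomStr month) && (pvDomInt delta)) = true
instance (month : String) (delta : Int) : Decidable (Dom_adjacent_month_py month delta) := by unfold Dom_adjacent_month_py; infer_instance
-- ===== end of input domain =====

-- B replaces A's two while-loop month normalizations with one closed-form divmod on y*12+(m-1)+delta: simpler.


-- ===== PORT A =====
-- while m > 12: m -= 12; y += 1
def pvLoopUp (y m : Int) : Int × Int :=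
  if 12 < m then pvLoopUp (y + 1) (m - 12) else (y, m)
termination_by (m - 12).toNat
decreasing_by omega

-- while m < 1: m += 12; y -= 1
def pvLoopDown (y m : Int) : Int × Int :=
  if m < 1 then pvLoopDown (y - 1) (m + 12) else (y, m)
termination_by (1 - m).toNat
decreasing_by omega

def adjacent_month_py (month : String) (delta : Int) : String :=
  -- y, m = map(int, month.split("-")): any parse failure or wrong arity raises → except returns month
  match PySem.Str.split? month "-" with
  | none => month   -- unreachable: separator "-" is non-empty
  | some parts =>
    match parts.map PySem.Int.ofStr? with
    | [some y, some m] =>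
        let q := pvLoopUp y (m + delta)
        let p := pvLoopDown q.1 q.2
        PySem.Int.toStr p.1 ++ "-" ++ PySem.Str.zfill (PySem.Int.toStr p.2) 2
    | _ => month

-- ===== PORT B =====
def adjacent_month_py_alt (month : String) (delta : Int) : String :=
  -- y, m = map(int, month.split("-")): exactly two parts, each parsed by int(); any failure → except returns month
  let parts := (PySem.Str.split? month "-").getD []   -- separator "-" is non-empty, so split? always returns
  let r : Option String :=
    if parts.length == 2 then
      (PySem.Int.ofStr? (parts.getD 0 "")).bind fun y =>
        (PySem.Int.ofStr? (parts.getD 1 "")).map fun m =>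
          let total := y * 12 + (m - 1) + delta
          -- new_y, rem = divmod(total, 12); divisor 12 ≠ 0 so divmod always returns
          let new_y := PySem.Int.floordiv total 12
          let rem := PySem.Int.mod total 12
          PySem.Int.toStr new_y ++ "-" ++ PySem.Str.zfill (PySem.Int.toStr (rem + 1)) 2
    else none
  r.getD month

-- ===== PRECONDITION & SPEC =====
def Spec_adjacent_month_py (month : String) (delta : Int) (out : String) : Prop := out = adjacent_month_py_alt month delta
instance (month : String) (delta : Int) (out : String) : Decidable (Spec_adjacent_month_py month delta out) := by unfold Spec_adjacent_month_py; infer_instance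

-- ===== CLAIM (what is proved, stated in full; the proofs are below) =====
def Claim_equal_adjacent_month_py : Prop := ∀ (month : String) (delta : Int), Dom_adjacent_month_py month delta → Spec_adjacent_month_py month delta (adjacent_month_py month delta)

-- ===== LEMMAS AND PROOFS =====

lemma pvLoopUp_spec (y m : Int) :
    (pvLoopUp y m).1 * 12 + (pvLoopUp y m).2 = y * 12 + m ∧ (pvLoopUp y m).2 ≤ 12 := by
  fun_induction pvLoopUp y m with
  | case1 y m h ih => omega
  | case2 y m h => simp; omega

lemma pvLoopDown_spec (y m : Int) (hm : m ≤ 12) :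
    (pvLoopDown y m).1 * 12 + (pvLoopDown y m).2 = y * 12 + m ∧
    1 ≤ (pvLoopDown y m).2 ∧ (pvLoopDown y m).2 ≤ 12 := by
  fun_induction pvLoopDown y m with
  | case1 y m h ih =>
      have := ih (by omega)
      omega
  | case2 y m h => simp; omega

lemma pv_closed_form (y m delta : Int) :
    pvLoopDown (pvLoopUp y (m + delta)).1 (pvLoopUp y (m + delta)).2 =
      (PySem.Int.floordiv (y * 12 + (m - 1) + delta) 12,
       PySem.Int.mod (y * 12 + (m - 1) + delta) 12 + 1) := by
  obtain ⟨h1, h2⟩ := pvLoopUp_spec y (m + delta)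
  obtain ⟨h3, h4, h5⟩ := pvLoopDown_spec (pvLoopUp y (m + delta)).1 (pvLoopUp y (m + delta)).2 h2
  rcases hp : pvLoopDown (pvLoopUp y (m + delta)).1 (pvLoopUp y (m + delta)).2 with ⟨a, b⟩
  rw [hp] at h3 h4 h5
  rw [PySem.Int.floordiv_eq_ediv_of_pos (by norm_num), PySem.Int.mod_eq_emod_of_pos (by norm_num)]
  simp only [Prod.mk.injEq] at *
  omega

-- ===== VERDICT (by name: the statement is the Claim_ definition above) =====
theorem adjacent_month_py_spec : Claim_equal_adjacent_month_py := by
  intro month delta _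
  unfold Spec_adjacent_month_py adjacent_month_py adjacent_month_py_alt
  rcases hs : PySem.Str.split? month "-" with _ | parts
  · rfl
  · rcases parts with _ | ⟨a, _ | ⟨b, _ | ⟨c, rest⟩⟩⟩
    · rfl
    · cases ha : PySem.Int.ofStr? a <;> simp [List.map, ha]
    · cases ha : PySem.Int.ofStr? a <;> cases hb : PySem.Int.ofStr? b <;>
        simp [List.map, List.getD, ha, hb, pv_closed_form]
    · cases ha : PySem.Int.ofStr? a <;> cases hb : PySem.Int.ofStr? b <;>
        simp [List.map, ha, hb]
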